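-- pv_equiv track=rewrite | github.com/pranislav/Spatial_Light_Modulator_Module | lc-slm/src/calibration_lib.py | find_highest_value_coordinates
-- ===== SOURCE A (Python) =====
-- def find_highest_value_coordinates(arr):
--     max_value = arr[0][0]
--     max_i = 0
--     max_j = 0
--     for i in range(len(arr)):
--         for j in range(len(arr[i])):
--             if arr[i][j] > max_value:
--                 max_value = arr[i][j]
--                 max_i = i
--                 max_j = j
--     return max_i, max_j
-- ===== SOURCE B (Python) =====
-- def find_highest_value_coordinates(arr):
--     best = arr[0][0]
--     best_i = 0
--     best_j = 0
--     for i, row in enumerate(arr):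
--         if not row:
--             continue
--         row_max = row[0]
--         row_j = 0
--         for j, v in enumerate(row[1:], 1):
--             if v > row_max:
--                 row_max = v
--                 row_j = j
--         if row_max > best:
--             best = row_max
--             best_i = i
--             best_j = row_j
--     return best_i, best_j
-- ===== Notes on version B (the rewrite author's own statement) =====
-- stated objective: alternative
-- what changed: Replaces A's flat index-by-index scan over range(len) with a two-phase reduction: a per-row first-argmax pass over each non-empty row followed by an inter-row strict-max update, iterating with enumerate instead of indexing.
import Mathlib
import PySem

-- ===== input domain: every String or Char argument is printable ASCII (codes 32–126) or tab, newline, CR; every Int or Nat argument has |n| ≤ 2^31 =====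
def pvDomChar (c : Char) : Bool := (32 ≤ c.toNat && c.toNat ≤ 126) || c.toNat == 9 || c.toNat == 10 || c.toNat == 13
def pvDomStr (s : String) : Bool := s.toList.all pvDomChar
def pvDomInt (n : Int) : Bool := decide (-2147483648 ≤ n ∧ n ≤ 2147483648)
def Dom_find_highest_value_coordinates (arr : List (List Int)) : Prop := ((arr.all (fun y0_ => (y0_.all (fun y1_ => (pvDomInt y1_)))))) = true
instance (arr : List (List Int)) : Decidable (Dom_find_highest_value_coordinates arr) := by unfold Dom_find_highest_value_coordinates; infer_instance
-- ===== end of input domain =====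

-- B restructures A's flat element-by-element scan as a per-row argmax pass plus an
-- inter-row reduction (same cost; a different decomposition of the same search).

-- ===== PORT A =====
def find_highest_value_coordinates (arr : List (List Int)) : Int × Int :=
  let max0 : Int := PySem.List.pyGetD (PySem.List.pyGetD arr 0 []) 0 0
  let st :=
    (PySem.List.pyRange 0 (arr.length : Int) 1).foldl
      (fun s i =>
        let row := PySem.List.pyGetD arr i []
        (PySem.List.pyRange 0 (row.length : Int) 1).foldl
          (fun t j =>
            if PySem.List.pyGetD row j 0 > t.1 then (PySem.List.pyGetD row j 0, i, j) else t)
          s)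
      (max0, (0 : Int), (0 : Int))
  (st.2.1, st.2.2)

-- ===== PORT B =====
def find_highest_value_coordinates_alt (arr : List (List Int)) : Int × Int :=
  let best : Int := PySem.List.pyGetD (PySem.List.pyGetD arr 0 []) 0 0
  let st :=
    (PySem.List.enumerate arr 0).foldl
      (fun s p =>
        match p.2 with
        | [] => s   -- 'if not row: continue'
        | r0 :: rest =>
          let rm :=
            (PySem.List.enumerate rest 1).foldl
              (fun q e => if e.2 > q.1 then (e.2, e.1) else q) (r0, (0 : Int))
          if rm.1 > s.1 then (rm.1, p.1, rm.2) else s)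
      (best, (0 : Int), (0 : Int))
  (st.2.1, st.2.2)

-- ===== PRECONDITION & SPEC =====
-- Pre_ excludes exactly the inputs on which the Python A raises IndexError at
-- 'arr[0][0]': the empty list and lists whose first row is empty.
def Pre_find_highest_value_coordinates (arr : List (List Int)) : Prop :=
  arr ≠ [] ∧ arr.headD [] ≠ []
instance (arr : List (List Int)) : Decidable (Pre_find_highest_value_coordinates arr) := by
  unfold Pre_find_highest_value_coordinates; infer_instance
def pvWitness_find_highest_value_coordinates : List (List Int) := [[1, 2], [], [3, 3]]
def Spec_find_highest_value_coordinates (arr : List (List Int)) (out : Int × Int) : Prop := out = find_highest_value_coordinates_alt arr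
instance (arr : List (List Int)) (out : Int × Int) : Decidable (Spec_find_highest_value_coordinates arr out) := by unfold Spec_find_highest_value_coordinates; infer_instance

-- ===== CLAIM (what is proved, stated in full; the proofs are below) =====
def Claim_equal_find_highest_value_coordinates : Prop := ∀ (arr : List (List Int)), Dom_find_highest_value_coordinates arr → Pre_find_highest_value_coordinates arr → Spec_find_highest_value_coordinates arr (find_highest_value_coordinates arr)

-- ===== LEMMAS AND PROOFS =====

-- A's inner-loop step (3-component state: value, row index, col index) and
-- B's inner-loop step (2-component state: value, col index).
def pvStepA (i : Int) (t : Int × Int × Int) (e : Int × Int) : Int × Int × Int :=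
  if e.2 > t.1 then (e.2, i, e.1) else t
def pvStepQ (q : Int × Int) (e : Int × Int) : Int × Int :=
  if e.2 > q.1 then (e.2, e.1) else q

-- The running max never decreases.
theorem pvMonoQ (l : List (Int × Int)) (w j : Int) : w ≤ (l.foldl pvStepQ (w, j)).1 := by
  induction l generalizing w j with
  | nil => simp
  | cons e l ih =>
    simp only [List.foldl_cons, pvStepQ]
    by_cases h : e.2 > w
    · simp only [if_pos h]; have := ih e.2 e.1; omega
    · simp only [if_neg h]; exact ih w j

-- Seed comparison: a larger seed either absorbs the whole fold, or agrees with
-- the smaller-seeded fold once that one's value exceeds it.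
theorem pvSeedQ (l : List (Int × Int)) (w1 w2 j1 j2 : Int) (h : w2 ≤ w1) :
    ((l.foldl pvStepQ (w2, j2)).1 ≤ w1 → l.foldl pvStepQ (w1, j1) = (w1, j1)) ∧
    (w1 < (l.foldl pvStepQ (w2, j2)).1 → l.foldl pvStepQ (w1, j1) = l.foldl pvStepQ (w2, j2)) := by
  induction l generalizing w1 w2 j1 j2 with
  | nil => exact ⟨fun _ => rfl, fun hlt => absurd (show w1 < w2 from hlt) (by omega)⟩
  | cons e l ih =>
    simp only [List.foldl_cons, pvStepQ]
    by_cases h2 : e.2 > w2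
    · by_cases h1 : e.2 > w1
      · simp only [if_pos h1, if_pos h2]
        exact ⟨fun hc => absurd hc (by have := pvMonoQ l e.2 e.1; omega), fun _ => by trivial⟩
      · simp only [if_pos h2, if_neg h1]
        exact ih w1 e.2 j1 e.1 (by omega)
    · have h1 : ¬ e.2 > w1 := by omega
      simp only [if_neg h1, if_neg h2]
      exact ih w1 w2 j1 j2 h

-- Fixpoint: if the fold's value did not grow, the state is unchanged.
theorem pvFixQ (l : List (Int × Int)) (w j : Int)
    (h : (l.foldl pvStepQ (w, j)).1 ≤ w) : l.foldl pvStepQ (w, j) = (w, j) :=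
  (pvSeedQ l w w j j le_rfl).1 h

-- A's indexed inner fold, expressed through B's 2-state fold.
theorem pvGenA (l : List (Int × Int)) (i v mi mj : Int) :
    l.foldl (pvStepA i) (v, mi, mj) =
      (if (l.foldl pvStepQ (v, mj)).1 > v
       then ((l.foldl pvStepQ (v, mj)).1, i, (l.foldl pvStepQ (v, mj)).2)
       else (v, mi, mj)) := by
  induction l generalizing v mi mj with
  | nil => simp
  | cons e l ih =>
    simp only [List.foldl_cons, pvStepA, pvStepQ]
    by_cases h : e.2 > v
    · simp only [if_pos h]
      rw [ih e.2 i e.1]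
      by_cases hq : (l.foldl pvStepQ (e.2, e.1)).1 > e.2
      · have hv : (l.foldl pvStepQ (e.2, e.1)).1 > v := by omega
        rw [if_pos hq, if_pos hv]
      · have hfix := pvFixQ l e.2 e.1 (by omega)
        rw [if_neg hq, hfix]
        simp [h]
    · simp only [if_neg h]
      exact ih v mi mj

theorem pvEnumNil (s : Int) : PySem.List.enumerate ([] : List Int) s = [] := by
  simp [PySem.List.enumerate]

theorem pvEnumCons (r0 : Int) (rest : List Int) :
    PySem.List.enumerate (r0 :: rest) 0 = (0, r0) :: PySem.List.enumerate rest 1 := by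
  simp [PySem.List.enumerate]

-- Row lemma: A's scan of a non-empty row from state s equals B's
-- row-argmax followed by a single strict update of s.
theorem pvRowCons (r0 : Int) (rest : List Int) (i : Int) (s : Int × Int × Int) :
    (PySem.List.enumerate (r0 :: rest) 0).foldl (pvStepA i) s =
      (if ((PySem.List.enumerate rest 1).foldl pvStepQ (r0, 0)).1 > s.1
       then (((PySem.List.enumerate rest 1).foldl pvStepQ (r0, 0)).1, i,
             ((PySem.List.enumerate rest 1).foldl pvStepQ (r0, 0)).2)
       else s) := by
  rw [pvEnumCons, List.foldl_cons]
  by_cases h : r0 > s.1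
  · have h1 : pvStepA i s (0, r0) = (r0, i, 0) := by simp [pvStepA, h]
    rw [h1, pvGenA]
    by_cases hq : ((PySem.List.enumerate rest 1).foldl pvStepQ (r0, 0)).1 > r0
    · have h2 : ((PySem.List.enumerate rest 1).foldl pvStepQ (r0, 0)).1 > s.1 := by omega
      rw [if_pos hq, if_pos h2]
    · have hfix := pvFixQ (PySem.List.enumerate rest 1) r0 0 (by omega)
      rw [if_neg hq, hfix]
      simp [h]
  · have h1 : pvStepA i s (0, r0) = s := by simp [pvStepA, h]
    rw [h1]
    have hs : s = (s.1, s.2.1, s.2.2) := rfl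
    rw [hs, pvGenA]
    obtain ⟨hle, hlt⟩ := pvSeedQ (PySem.List.enumerate rest 1) s.1 r0 s.2.2 0 (by omega)
    by_cases hq : ((PySem.List.enumerate rest 1).foldl pvStepQ (r0, 0)).1 > s.1
    · rw [hlt hq, if_pos hq]
    · rw [hle (by omega)]
      simp [hq]

-- Main lemma: A's flat doubly-indexed fold equals B's enumerate/row-argmax fold.
theorem pvMain (arr : List (List Int)) (init : Int × Int × Int) :
    (PySem.List.pyRange 0 (arr.length : Int) 1).foldl
      (fun s i =>
        let row := PySem.List.pyGetD arr i []
        (PySem.List.pyRange 0 (row.length : Int) 1).foldl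
          (fun t j =>
            if PySem.List.pyGetD row j 0 > t.1 then (PySem.List.pyGetD row j 0, i, j) else t)
          s)
      init
    = (PySem.List.enumerate arr 0).foldl
      (fun s p =>
        match p.2 with
        | [] => s
        | r0 :: rest =>
          let rm :=
            (PySem.List.enumerate rest 1).foldl
              (fun q e => if e.2 > q.1 then (e.2, e.1) else q) (r0, (0 : Int))
          if rm.1 > s.1 then (rm.1, p.1, rm.2) else s)
      init := by
  rw [PySem.List.enumerate_eq_map_pyRange (d := ([] : List Int)), List.foldl_map]
  have hlen : PySem.List.len arr = (arr.length : Int) := by simp [PySem.List.len]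
  rw [hlen]
  congr 1
  funext s i
  have hinner :
      (PySem.List.pyRange 0 ((PySem.List.pyGetD arr i []).length : Int) 1).foldl
        (fun t j =>
          if PySem.List.pyGetD (PySem.List.pyGetD arr i []) j 0 > t.1
          then (PySem.List.pyGetD (PySem.List.pyGetD arr i []) j 0, i, j) else t) s
      = (PySem.List.enumerate (PySem.List.pyGetD arr i []) 0).foldl (pvStepA i) s := by
    rw [PySem.List.enumerate_eq_map_pyRange (d := (0 : Int)), List.foldl_map]
    have : PySem.List.len (PySem.List.pyGetD arr i []) = ((PySem.List.pyGetD arr i []).length : Int) := by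
      simp [PySem.List.len]
    rw [this]
    rfl
  show (PySem.List.pyRange 0 ((PySem.List.pyGetD arr i []).length : Int) 1).foldl _ s = _
  rw [hinner]
  rcases hrow : PySem.List.pyGetD arr i [] with _ | ⟨r0, rest⟩
  · rw [pvEnumNil, List.foldl_nil]
  · rw [pvRowCons]
    rfl

-- ===== VERDICT (by name: the statement is the Claim_ definition above) =====
theorem find_highest_value_coordinates_spec : Claim_equal_find_highest_value_coordinates := by
  intro arr _ _
  unfold Spec_find_highest_value_coordinates find_highest_value_coordinates find_highest_value_coordinates_alt
  exact congrArg (fun st : Int × Int × Int => (st.2.1, st.2.2)) (pvMain arr _)
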